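-- pv_equiv track=rewrite | github.com/Bharath-kolekar/cogone | backend/app/services/ai_orchestration/validators_maximum/maximum_consistency_validator.py | _check_functions_second
-- ===== SOURCE A (Python) =====
-- def _check_functions_second(code: str) -> bool:
--     """Check if functions come after imports"""
--     lines = code.split('\n')
--     import_lines = []
--     function_lines = []
--
--     for i, line in enumerate(lines):
--         if line.strip().startswith(('import ', 'from ')):
--             import_lines.append(i)
--         elif line.strip().startswith('def '):
--             function_lines.append(i)
--
--     if not import_lines or not function_lines:
--         return True
--
--     return max(import_lines) < min(function_lines)
-- ===== SOURCE B (Python) =====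
-- def _check_functions_second(code: str) -> bool:
--     """Check if functions come after imports"""
--     seen_def = False
--     for line in code.split('\n'):
--         stripped = line.strip()
--         if stripped.startswith(('import ', 'from ')):
--             if seen_def:
--                 return False
--         elif stripped.startswith('def '):
--             seen_def = True
--     return True
-- ===== Notes on version B (the rewrite author's own statement) =====
-- stated objective: simpler
-- what changed: Single pass with one boolean seen_def flag and an early False on the first import that follows a def, instead of collecting two index lists and comparing max(imports) with min(defs).
import Mathlib
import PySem

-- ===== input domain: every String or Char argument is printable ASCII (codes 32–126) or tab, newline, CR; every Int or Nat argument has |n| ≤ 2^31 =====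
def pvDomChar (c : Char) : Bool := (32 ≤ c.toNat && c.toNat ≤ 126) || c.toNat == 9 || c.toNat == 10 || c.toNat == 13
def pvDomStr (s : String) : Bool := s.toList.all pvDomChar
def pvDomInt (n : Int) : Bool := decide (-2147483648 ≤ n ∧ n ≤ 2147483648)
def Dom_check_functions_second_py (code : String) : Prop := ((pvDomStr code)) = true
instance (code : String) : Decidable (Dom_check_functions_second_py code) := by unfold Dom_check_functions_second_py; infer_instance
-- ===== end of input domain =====

-- B replaces A's two index lists plus max/min comparison with a one-pass seen_def flag and early exit (simpler, same result).

-- ===== PORT A =====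
-- loop body of A's 'for i, line in enumerate(lines)'
def aStep (st : List Int × List Int) (p : Int × List Char) : List Int × List Int :=
  if PySem.Chars.startswith (PySem.Chars.strip p.2) "import ".toList ||
     PySem.Chars.startswith (PySem.Chars.strip p.2) "from ".toList then
    (st.1 ++ [p.1], st.2)
  else if PySem.Chars.startswith (PySem.Chars.strip p.2) "def ".toList then
    (st.1, st.2 ++ [p.1])
  else st

-- A's final 'if not … or not …: return True; return max(...) < min(...)'
def aDecide (imps funs : List Int) : Bool :=
  if imps.isEmpty || funs.isEmpty then true
  else match PySem.List.max? imps (fun x => x), PySem.List.min? funs (fun x => x) with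
    | some M, some m => decide (M < m)
    | _, _ => true

def check_functions_second_py (code : String) : Bool :=
  let lines := PySem.Chars.splitOn code.toList "\n".toList
  let st := (PySem.List.enumerate lines 0).foldl aStep ([], [])
  aDecide st.1 st.2

-- ===== PORT B =====
def altGo : List (List Char) → Bool → Bool
  | [], _ => true
  | line :: rest, seen =>
    if PySem.Chars.startswith (PySem.Chars.strip line) "import ".toList ||
       PySem.Chars.startswith (PySem.Chars.strip line) "from ".toList then
      if seen then false else altGo rest seen
    else if PySem.Chars.startswith (PySem.Chars.strip line) "def ".toList then
      altGo rest true
    else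
      altGo rest seen

def check_functions_second_py_alt (code : String) : Bool :=
  altGo (PySem.Chars.splitOn code.toList "\n".toList) false

-- ===== PRECONDITION & SPEC =====
def Spec_check_functions_second_py (code : String) (out : Bool) : Prop := out = check_functions_second_py_alt code
instance (code : String) (out : Bool) : Decidable (Spec_check_functions_second_py code out) := by unfold Spec_check_functions_second_py; infer_instance

-- ===== CLAIM (what is proved, stated in full; the proofs are below) =====
def Claim_equal_check_functions_second_py : Prop := ∀ (code : String), Dom_check_functions_second_py code → Spec_check_functions_second_py code (check_functions_second_py code)

-- ===== LEMMAS AND PROOFS =====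

lemma altGo_cons (line : List Char) (rest : List (List Char)) (seen : Bool) :
    altGo (line :: rest) seen =
      if PySem.Chars.startswith (PySem.Chars.strip line) "import ".toList ||
         PySem.Chars.startswith (PySem.Chars.strip line) "from ".toList then
        if seen then false else altGo rest seen
      else if PySem.Chars.startswith (PySem.Chars.strip line) "def ".toList then
        altGo rest true
      else
        altGo rest seen := rfl

lemma max?_some_of_ne_nil (xs : List Int) (h : xs ≠ []) :
    ∃ M, PySem.List.max? xs (fun x => x) = some M := by
  cases hm : PySem.List.max? xs (fun x => x) with
  | none => exact absurd ((PySem.List.max?_eq_none_iff xs _).mp hm) h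
  | some M => exact ⟨M, rfl⟩

lemma min?_some_of_ne_nil (xs : List Int) (h : xs ≠ []) :
    ∃ m, PySem.List.min? xs (fun x => x) = some m := by
  cases hm : PySem.List.min? xs (fun x => x) with
  | none => exact absurd ((PySem.List.min?_eq_none_iff xs _).mp hm) h
  | some m => exact ⟨m, rfl⟩

lemma aDecide_false_iff (imps funs : List Int) :
    aDecide imps funs = false ↔
      ∃ M m, PySem.List.max? imps (fun x => x) = some M ∧
             PySem.List.min? funs (fun x => x) = some m ∧ m ≤ M := by
  constructor
  · intro h
    unfold aDecide at h
    by_cases h1 : (imps.isEmpty || funs.isEmpty) = true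
    · rw [if_pos h1] at h; cases h
    · rw [if_neg h1] at h
      rcases Bool.or_eq_false_iff.mp (Bool.eq_false_iff.mpr h1) with ⟨hi, hf⟩
      obtain ⟨M, hM⟩ := max?_some_of_ne_nil imps (by simpa using hi)
      obtain ⟨m, hm⟩ := min?_some_of_ne_nil funs (by simpa using hf)
      rw [hM, hm] at h
      exact ⟨M, m, hM, hm, by simpa using of_decide_eq_false h⟩
  · rintro ⟨M, m, hM, hm, hle⟩
    have hi : imps ≠ [] := by
      intro e; rw [e, (PySem.List.max?_eq_none_iff ([] : List Int) _).mpr rfl] at hM; cases hM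
    have hf : funs ≠ [] := by
      intro e; rw [e, (PySem.List.min?_eq_none_iff ([] : List Int) _).mpr rfl] at hm; cases hm
    unfold aDecide
    rw [if_neg (by simp [hi, hf]), hM, hm]
    simpa using not_lt.mpr hle

-- once the decision is false (some import index ≥ some def index), folding more lines keeps it false
lemma aDecide_step_false (st : List Int × List Int) (p : Int × List Char)
    (h : aDecide st.1 st.2 = false) : aDecide (aStep st p).1 (aStep st p).2 = false := by
  obtain ⟨M, m, hM, hm, hle⟩ := (aDecide_false_iff _ _).mp h
  unfold aStep
  split_ifs with h1 h2
  · obtain ⟨M', hM'⟩ := max?_some_of_ne_nil (st.1 ++ [p.1]) (by simp)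
    have hMM' : M ≤ M' := PySem.List.max?_isMax hM' M
      (List.mem_append_left _ (PySem.List.max?_mem hM))
    exact (aDecide_false_iff _ _).mpr ⟨M', m, hM', hm, le_trans hle hMM'⟩
  · obtain ⟨m', hm'⟩ := min?_some_of_ne_nil (st.2 ++ [p.1]) (by simp)
    have hmm' : m' ≤ m := PySem.List.min?_isMin hm' m
      (List.mem_append_left _ (PySem.List.min?_mem hm))
    exact (aDecide_false_iff _ _).mpr ⟨M, m', hM, hm', le_trans hmm' hle⟩
  · exact (aDecide_false_iff _ _).mpr ⟨M, m, hM, hm, hle⟩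

lemma aDecide_fold_false (ls : List (Int × List Char)) (st : List Int × List Int)
    (h : aDecide st.1 st.2 = false) :
    aDecide (ls.foldl aStep st).1 (ls.foldl aStep st).2 = false := by
  induction ls generalizing st with
  | nil => exact h
  | cons p rest ih => exact ih _ (aDecide_step_false st p h)

-- rewriting helpers for the two programs' single steps
lemma aStep_imp (st : List Int × List Int) (p : Int × List Char)
    (h : (PySem.Chars.startswith (PySem.Chars.strip p.2) "import ".toList ||
          PySem.Chars.startswith (PySem.Chars.strip p.2) "from ".toList) = true) :
    aStep st p = (st.1 ++ [p.1], st.2) := by unfold aStep; rw [if_pos h]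

lemma aStep_def (st : List Int × List Int) (p : Int × List Char)
    (h1 : (PySem.Chars.startswith (PySem.Chars.strip p.2) "import ".toList ||
           PySem.Chars.startswith (PySem.Chars.strip p.2) "from ".toList) = false)
    (h2 : PySem.Chars.startswith (PySem.Chars.strip p.2) "def ".toList = true) :
    aStep st p = (st.1, st.2 ++ [p.1]) := by
  unfold aStep; rw [if_neg (by rw [h1]; simp), if_pos h2]

lemma aStep_other (st : List Int × List Int) (p : Int × List Char)
    (h1 : (PySem.Chars.startswith (PySem.Chars.strip p.2) "import ".toList ||
           PySem.Chars.startswith (PySem.Chars.strip p.2) "from ".toList) = false)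
    (h2 : PySem.Chars.startswith (PySem.Chars.strip p.2) "def ".toList = false) :
    aStep st p = st := by
  unfold aStep; rw [if_neg (by rw [h1]; simp), if_neg (by rw [h2]; simp)]

-- main invariant: B's flag loop computes A's final decision
lemma altGo_eq_fold (ls : List (List Char)) (s : Int) (imps funs : List Int)
    (himp : ∀ x ∈ imps, x < s) (hfun : ∀ x ∈ funs, x < s)
    (hok : aDecide imps funs = true) :
    altGo ls (!funs.isEmpty) =
      aDecide ((PySem.List.enumerate ls s).foldl aStep (imps, funs)).1
              ((PySem.List.enumerate ls s).foldl aStep (imps, funs)).2 := by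
  induction ls generalizing s imps funs with
  | nil => simp [altGo, PySem.List.enumerate_nil, hok]
  | cons line rest ih =>
    rw [PySem.List.enumerate_cons, List.foldl_cons]
    by_cases h1 : (PySem.Chars.startswith (PySem.Chars.strip line) "import ".toList ||
                   PySem.Chars.startswith (PySem.Chars.strip line) "from ".toList) = true
    · rw [aStep_imp (imps, funs) (s, line) h1]
      by_cases hf : funs.isEmpty
      · have hfe : funs = [] := List.isEmpty_iff.mp hf
        have hB : altGo (line :: rest) (!funs.isEmpty) = altGo rest (!funs.isEmpty) := by
          rw [show (!funs.isEmpty) = false from by simp [hf], altGo_cons, if_pos h1]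
          simp
        rw [hB]
        exact ih (s + 1) (imps ++ [s]) funs
          (by intro x hx; rcases List.mem_append.mp hx with h | h
              · exact lt_trans (himp x h) (by omega)
              · simp at h; omega)
          (by intro x hx; exact lt_trans (hfun x hx) (by omega))
          (by simp [aDecide, hfe])
      · have hB : altGo (line :: rest) (!funs.isEmpty) = false := by
          rw [show (!funs.isEmpty) = true from by simp [hf], altGo_cons, if_pos h1]
          simp
        rw [hB]
        have hfne : funs ≠ [] := fun e => hf (by simp [e])
        obtain ⟨m, hm⟩ := min?_some_of_ne_nil funs hfne
        obtain ⟨M, hM⟩ := max?_some_of_ne_nil (imps ++ [s]) (by simp)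
        have hsM : s ≤ M := PySem.List.max?_isMax hM s (by simp)
        have hms : m < s := hfun m (PySem.List.min?_mem hm)
        exact (aDecide_fold_false _ _ ((aDecide_false_iff _ _).mpr
          ⟨M, m, hM, hm, by omega⟩)).symm
    · have h1' : (PySem.Chars.startswith (PySem.Chars.strip line) "import ".toList ||
                  PySem.Chars.startswith (PySem.Chars.strip line) "from ".toList) = false :=
        Bool.eq_false_iff.mpr h1
      by_cases h2 : PySem.Chars.startswith (PySem.Chars.strip line) "def ".toList = true
      · -- def line
        rw [aStep_def (imps, funs) (s, line) h1' h2]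
        have hB : altGo (line :: rest) (!funs.isEmpty) = altGo rest true := by
          rw [altGo_cons, if_neg (by rw [h1']; simp), if_pos h2]
        rw [hB]
        have hok' : aDecide imps (funs ++ [s]) = true := by
          by_cases hi : imps = []
          · simp [aDecide, hi]
          · obtain ⟨M, hM⟩ := max?_some_of_ne_nil imps hi
            obtain ⟨m', hm'⟩ := min?_some_of_ne_nil (funs ++ [s]) (by simp)
            have hMs : M < s := himp M (PySem.List.max?_mem hM)
            have hMm' : M < m' := by
              rcases List.mem_append.mp (PySem.List.min?_mem hm') with h | h
              · have hfne : funs ≠ [] := List.ne_nil_of_mem h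
                obtain ⟨m, hm⟩ := min?_some_of_ne_nil funs hfne
                have hnot : ¬ aDecide imps funs = false := by simp [hok]
                have hMltm : M < m := by
                  by_contra hc
                  exact hnot ((aDecide_false_iff _ _).mpr ⟨M, m, hM, hm, by omega⟩)
                exact lt_of_lt_of_le hMltm (PySem.List.min?_isMin hm m' h)
              · simp at h; omega
            unfold aDecide
            rw [if_neg (by simp [hi]), hM, hm']
            simpa using hMm'
        have := ih (s + 1) imps (funs ++ [s])
          (by intro x hx; exact lt_trans (himp x hx) (by omega))
          (by intro x hx; rcases List.mem_append.mp hx with h | h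
              · exact lt_trans (hfun x h) (by omega)
              · simp at h; omega)
          hok'
        rwa [show (!(funs ++ [s]).isEmpty) = true from by simp] at this
      · -- other line
        have h2' : PySem.Chars.startswith (PySem.Chars.strip line) "def ".toList = false :=
          Bool.eq_false_iff.mpr h2
        rw [aStep_other (imps, funs) (s, line) h1' h2']
        have hB : altGo (line :: rest) (!funs.isEmpty) = altGo rest (!funs.isEmpty) := by
          rw [altGo_cons, if_neg (by rw [h1']; simp), if_neg (by rw [h2']; simp)]
        rw [hB]
        exact ih (s + 1) imps funs
          (by intro x hx; exact lt_trans (himp x hx) (by omega))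
          (by intro x hx; exact lt_trans (hfun x hx) (by omega))
          hok

-- ===== VERDICT (by name: the statement is the Claim_ definition above) =====
theorem check_functions_second_py_spec : Claim_equal_check_functions_second_py := by
  intro code _
  unfold Spec_check_functions_second_py check_functions_second_py check_functions_second_py_alt
  have := altGo_eq_fold (PySem.Chars.splitOn code.toList "\n".toList) 0 [] []
    (by intro x hx; simp at hx) (by intro x hx; simp at hx) (by simp [aDecide])
  simpa using this.symm
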